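-- pv_equiv track=rewrite | github.com/Kimyechan/codingTestPractice | programmers/불량 사용자.py | checkCandidate
-- ===== SOURCE A (Python) =====
-- def checkCandidate(userId, id):
--     result = []
--     for cand in userId:
--         if len(cand) != len(id):
--             continue
--         correctFlag = True
--         for idx, c in enumerate(list(cand)):
--             if id[idx] == "*":
--                 continue
--             if id[idx] != c:
--                 correctFlag = False
--                 break
--         if correctFlag:
--             result.append(cand)
--
--     return result
-- ===== SOURCE B (Python) =====
-- def checkCandidate(userId, id):
--     # Position-major sieve: start from the candidates of the right length and
--     # run one filtering pass over the pool per non-wildcard pattern position.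
--     pool = [cand for cand in userId if len(cand) == len(id)]
--     for i, ch in enumerate(id):
--         if ch != '*':
--             pool = [cand for cand in pool if cand[i] == ch]
--     return pool
-- ===== Notes on version B (the rewrite author's own statement) =====
-- stated objective: alternative
-- what changed: B inverts the loop nesting into a position-major sieve: it keeps a surviving pool (initially the right-length candidates) and runs one filtering pass over the whole pool per non-wildcard pattern position, instead of A's candidate-major scan with a flag and break over each candidate's characters.
import Mathlib
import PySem

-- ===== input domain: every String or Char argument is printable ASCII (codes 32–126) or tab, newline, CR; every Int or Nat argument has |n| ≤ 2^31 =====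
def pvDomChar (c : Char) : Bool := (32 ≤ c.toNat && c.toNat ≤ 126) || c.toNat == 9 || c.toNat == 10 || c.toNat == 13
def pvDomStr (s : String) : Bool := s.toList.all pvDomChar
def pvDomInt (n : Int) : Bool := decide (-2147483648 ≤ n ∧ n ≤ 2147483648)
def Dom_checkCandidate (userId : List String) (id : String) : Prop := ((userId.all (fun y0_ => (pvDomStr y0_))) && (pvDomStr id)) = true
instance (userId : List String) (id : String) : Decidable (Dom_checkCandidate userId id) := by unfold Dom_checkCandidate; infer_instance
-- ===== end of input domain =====

-- B is a position-major sieve: it keeps a pool of surviving candidates and runs one filtering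
-- pass per non-wildcard pattern position (objective: alternative decomposition; same results).

-- ===== PORT A =====
-- inner 'for idx, c in enumerate(list(cand))' loop with the correctFlag/break; idx is the running
-- enumerate index. 'id[idx]' is PySem.List.pyGet?; the 'none' (IndexError) arm is unreachable here
-- because the loop is only entered when len(cand) == len(id).
def innerA (idL : List Char) (idx : Nat) : List Char → Bool
  | [] => true
  | c :: rest =>
    match PySem.List.pyGet? idL (idx : Int) with
    | none => false
    | some d =>
      if d = '*' then innerA idL (idx + 1) rest
      else if d ≠ c then false
      else innerA idL (idx + 1) rest

-- outer 'for cand in userId' loop appending to result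
def loopA (idL : List Char) : List String → List String
  | [] => []
  | cand :: rest =>
    if cand.toList.length ≠ idL.length then loopA idL rest
    else if innerA idL 0 cand.toList then cand :: loopA idL rest
    else loopA idL rest

def checkCandidate (userId : List String) (id : String) : List String :=
  loopA id.toList userId

-- ===== PORT B =====
-- 'pool = [cand for cand in userId if len(cand) == len(id)]' then
-- 'for i, ch in enumerate(id): if ch != '*': pool = [cand for cand in pool if cand[i] == ch]'
def checkCandidate_alt (userId : List String) (id : String) : List String :=
  let pool0 := userId.filter (fun cand => cand.toList.length == id.toList.length)
  (PySem.List.enumerate id.toList 0).foldl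
    (fun pool p =>
      if p.2 ≠ '*' then
        pool.filter (fun cand => PySem.List.pyGet? cand.toList p.1 == some p.2)
      else pool)
    pool0

-- ===== PRECONDITION & SPEC =====
def Spec_checkCandidate (userId : List String) (id : String) (out : List String) : Prop := out = checkCandidate_alt userId id
instance (userId : List String) (id : String) (out : List String) : Decidable (Spec_checkCandidate userId id out) := by unfold Spec_checkCandidate; infer_instance

-- ===== CLAIM (what is proved, stated in full; the proofs are below) =====
def Claim_equal_checkCandidate : Prop := ∀ (userId : List String) (id : String), Dom_checkCandidate userId id → Spec_checkCandidate userId id (checkCandidate userId id)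

-- ===== LEMMAS AND PROOFS =====

-- proof-side middle term: the pattern's non-'*' (index, char) constraints from position k on
def consts (k : Nat) : List Char → List (Nat × Char)
  | [] => []
  | d :: rest => if d ≠ '*' then (k, d) :: consts (k + 1) rest else consts (k + 1) rest

-- A's flag-scan over the tail of cand starting at position k equals the constraint check for the
-- tail of id starting at position k, whenever the two tails have the same length.
lemma inner_eq (ys : List Char) : ∀ (xs : List Char) (k : Nat) (idL candL : List Char),
    idL.drop k = ys → candL.drop k = xs → xs.length = ys.length →
    innerA idL k xs
      = (consts k ys).all (fun p => PySem.List.pyGet? candL (p.1 : Int) == some p.2) := by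
  induction ys with
  | nil =>
    intro xs k idL candL _ _ hlen
    have : xs = [] := List.eq_nil_of_length_eq_zero (by simpa using hlen)
    subst this
    simp [innerA, consts]
  | cons d ys' ih =>
    intro xs k idL candL hid hcand hlen
    cases xs with
    | nil => simp at hlen
    | cons c xs' =>
      have hidk : idL[k]? = some d := by
        have h0 := congrArg (fun l => l[0]?) hid
        simpa [List.getElem?_drop] using h0
      have hcandk : candL[k]? = some c := by
        have h0 := congrArg (fun l => l[0]?) hcand
        simpa [List.getElem?_drop] using h0
      have hid' : idL.drop (k + 1) = ys' := by
        rw [← List.tail_drop, hid]; rfl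
      have hcand' : candL.drop (k + 1) = xs' := by
        rw [← List.tail_drop, hcand]; rfl
      have hlen' : xs'.length = ys'.length := by simpa using hlen
      have hget : PySem.List.pyGet? idL (k : Int) = some d := by
        rw [PySem.List.pyGet?_natCast]; exact hidk
      have hgetc : PySem.List.pyGet? candL (k : Int) = some c := by
        rw [PySem.List.pyGet?_natCast]; exact hcandk
      by_cases hstar : d = '*'
      · subst hstar
        simp only [innerA, hget, consts, ne_eq, not_true_eq_false, if_false]
        exact ih xs' (k + 1) idL candL hid' hcand' hlen'
      · by_cases hdc : d = c
        · subst hdc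
          simp only [innerA, hget, if_neg hstar, ne_eq, not_true_eq_false, if_false,
            consts, if_pos (by simpa using hstar), List.all_cons, hgetc]
          rw [ih xs' (k + 1) idL candL hid' hcand' hlen']
          simp
        · simp only [innerA, hget, if_neg hstar, ne_eq, hdc, not_false_eq_true, if_true,
            consts, if_pos (by simpa using hstar), List.all_cons, hgetc]
          simp [beq_iff_eq, Ne.symm hdc]

-- A's outer loop is a single filter by the combined predicate
lemma loop_eq (idL : List Char) : ∀ (userId : List String),
    loopA idL userId
      = userId.filter (fun cand =>
          cand.toList.length == idL.length &&
            (consts 0 idL).all (fun p => PySem.List.pyGet? cand.toList (p.1 : Int) == some p.2)) := by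
  intro userId
  induction userId with
  | nil => rfl
  | cons cand rest ih =>
    simp only [loopA, List.filter_cons, ih]
    by_cases hlen : cand.toList.length = idL.length
    · rw [if_neg (by simp [hlen])]
      rw [inner_eq idL cand.toList 0 idL cand.toList (by simp) (by simp) hlen]
      by_cases hall : (consts 0 idL).all
          (fun p => PySem.List.pyGet? cand.toList (p.1 : Int) == some p.2) = true
      · rw [if_pos hall, if_pos (by simp only [hlen, beq_self_eq_true, Bool.true_and]; exact hall)]
      · rw [if_neg hall, if_neg (by simp only [hlen, beq_self_eq_true, Bool.true_and]; exact hall)]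
    · rw [if_pos hlen, if_neg (by simp only [Bool.and_eq_true, beq_iff_eq]; exact fun h => hlen h.1)]

-- B's staged filtering passes collapse into one filter by the conjunction of the constraints
lemma fold_eq (ys : List Char) : ∀ (k : Nat) (l : List String),
    (PySem.List.enumerate ys (k : Int)).foldl
      (fun pool p =>
        if p.2 ≠ '*' then
          pool.filter (fun cand => PySem.List.pyGet? cand.toList p.1 == some p.2)
        else pool) l
      = l.filter (fun cand =>
          (consts k ys).all (fun p => PySem.List.pyGet? cand.toList (p.1 : Int) == some p.2)) := by
  induction ys with
  | nil => intro k l; simp [PySem.List.enumerate_nil, consts]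
  | cons d ys' ih =>
    intro k l
    rw [PySem.List.enumerate_cons]
    have hk : (k : Int) + 1 = ((k + 1 : Nat) : Int) := by push_cast; ring
    by_cases hstar : d = '*'
    · subst hstar
      simp only [List.foldl_cons, ne_eq, not_true_eq_false, if_false, consts, hk]
      exact ih (k + 1) l
    · simp only [List.foldl_cons, ne_eq, hstar, not_false_eq_true, if_true, consts, hk]
      rw [ih (k + 1) (l.filter _), List.filter_filter]
      refine List.filter_congr (fun cand _ => ?_)
      simp [List.all_cons, Bool.and_comm]
  termination_by ys => ys.length

-- ===== VERDICT (by name: the statement is the Claim_ definition above) =====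
theorem checkCandidate_spec : Claim_equal_checkCandidate := by
  intro userId id _
  simp only [Spec_checkCandidate, checkCandidate, checkCandidate_alt]
  rw [loop_eq]
  rw [show PySem.List.enumerate id.toList 0
        = PySem.List.enumerate id.toList ((0 : Nat) : Int) from rfl]
  rw [fold_eq id.toList 0, List.filter_filter]
  exact List.filter_congr (fun cand _ => by simp [Bool.and_comm])
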